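-- pv_equiv track=rewrite | github.com/iamvickynguyen/Kattis-Solutions | odd_binomial_coefficients.py | total
-- ===== SOURCE A (Python) =====
-- table = {}
--
-- def total(n):
--     if n == 0:
--         return 0
--     elif n == 1:
--         return 1
--     if n in table:
--         return table[n]
--     elif n % 2 == 0:
--         table[n] = 3*total(n//2)
--     else:
--         k = (n-1)//2
--         table[n] = 2*total(k) + total(k+1)
--     return table[n]
-- ===== SOURCE B (Python) =====
-- def total(n):
--     result = 0
--     ones = 0
--     for bit in (bin(n)[2:] if n > 0 else ''):
--         result *= 3
--         if bit == '1':
--             result += 1 << ones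
--             ones += 1
--     return result
-- ===== Notes on version B (the rewrite author's own statement) =====
-- stated objective: alternative
-- what changed: Replaces the memoized halving recursion with a non-recursive left-to-right pass over n's binary digits that maintains (result, ones-seen), using the fact that the answer for a prefix p evolves as result*3 (+ 2^ones on a 1-bit).
import Mathlib
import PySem

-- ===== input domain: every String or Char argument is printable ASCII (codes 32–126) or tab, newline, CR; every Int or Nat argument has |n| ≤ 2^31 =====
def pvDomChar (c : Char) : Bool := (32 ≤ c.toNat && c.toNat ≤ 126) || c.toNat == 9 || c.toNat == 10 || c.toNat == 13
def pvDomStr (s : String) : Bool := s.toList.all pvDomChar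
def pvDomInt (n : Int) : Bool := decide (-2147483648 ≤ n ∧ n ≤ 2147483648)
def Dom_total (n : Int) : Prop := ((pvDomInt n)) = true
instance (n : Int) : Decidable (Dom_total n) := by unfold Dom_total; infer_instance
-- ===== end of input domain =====

-- B replaces A's memoized halving recursion by a non-recursive left-to-right pass
-- over n's binary digits maintaining (result, ones-seen) (objective: alternative).
-- A's global memo table only caches deterministic values, so the return value
-- does not depend on it.

-- ===== PORT A =====
-- A's recursion, branch for branch, on n.toNat: A only terminates for n ≥ 0
-- (Pre_), and on such n Python's n//2 and (n-1)//2 agree with Nat division.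
-- The global memo table is dropped (it caches pure, deterministic values) and
-- a structural fuel argument makes the same recursion total: with fuel ≥ m the
-- fuel branch is never taken (totalAux_eq_S below needs only m ≤ fuel).
def totalAux : Nat → Nat → Int
  | 0, _ => 0
  | fuel + 1, m =>
    if m = 0 then 0
    else if m = 1 then 1
    else if m % 2 = 0 then 3 * totalAux fuel (m / 2)
    else 2 * totalAux fuel ((m - 1) / 2) + totalAux fuel ((m - 1) / 2 + 1)

def total (n : Int) : Int := totalAux n.toNat n.toNat

-- ===== PORT B =====
-- hand port of bin(n)[2:] for n > 0: the binary digits, here built least-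
-- significant first (structural fuel, never exhausted for fuel >= m) and
-- reversed to the most-significant-first order Python's bin() yields
def bitsRevAux : Nat → Nat → List Nat
  | 0, _ => []
  | fuel + 1, m => if m = 0 then [] else m % 2 :: bitsRevAux fuel (m / 2)

def pyBin (m : Nat) : List Nat := (bitsRevAux m m).reverse

-- the loop body: state (result, ones), one binary digit per step
def stepB (st : Int × Nat) (b : Nat) : Int × Nat :=
  let r := st.1 * 3
  if b = 1 then (r + 2 ^ st.2, st.2 + 1) else (r, st.2)

def total_alt (n : Int) : Int :=
  ((pyBin n.toNat).foldl stepB (0, 0)).1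

-- ===== PRECONDITION & SPEC =====
-- Pre_ excludes n < 0, on which A's recursion never reaches a base case and
-- Python raises RecursionError (B would return 0, the empty sum).
def Pre_total (n : Int) : Prop := 0 ≤ n
instance (n : Int) : Decidable (Pre_total n) := by unfold Pre_total; infer_instance
def pvWitness_total : Int := 5

def Spec_total (n : Int) (out : Int) : Prop := out = total_alt n
instance (n : Int) (out : Int) : Decidable (Spec_total n out) := by unfold Spec_total; infer_instance

-- ===== CLAIM (what is proved, stated in full; the proofs are below) =====
def Claim_equal_total : Prop := ∀ (n : Int), Dom_total n → Pre_total n → Spec_total n (total n)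

-- ===== LEMMAS AND PROOFS =====

-- the common value: sum of 2^popcount(i) over i < m
def popcountAux : Nat → Nat → Nat
  | 0, _ => 0
  | fuel + 1, m => if m = 0 then 0 else popcountAux fuel (m / 2) + m % 2

def popcount (m : Nat) : Nat := popcountAux m m

def S (m : Nat) : Int := ((List.range m).map (fun i => (2:Int) ^ popcount i)).sum

theorem popcountAux_eq : ∀ (f f' m : Nat), m ≤ f → m ≤ f' →
    popcountAux f m = popcountAux f' m := by
  intro f
  induction f with
  | zero =>
    intro f' m h _
    interval_cases m
    cases f' <;> simp [popcountAux]
  | succ f ih =>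
    intro f' m h h'
    by_cases hm : m = 0
    · subst hm; cases f' <;> simp [popcountAux]
    · obtain ⟨f'', rfl⟩ : ∃ k, f' = k + 1 := ⟨f' - 1, by omega⟩
      simp only [popcountAux, if_neg hm]
      rw [ih f'' (m / 2) (by omega) (by omega)]

theorem pc_zero : popcount 0 = 0 := rfl

theorem pc_even (t : Nat) : popcount (2 * t) = popcount t := by
  rcases Nat.eq_zero_or_pos t with h | h
  · simp [h]
  · unfold popcount
    obtain ⟨f, hf⟩ : ∃ k, 2 * t = k + 1 := ⟨2 * t - 1, by omega⟩
    rw [hf]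
    have h0 : ¬ f + 1 = 0 := by omega
    simp only [popcountAux, if_neg h0]
    have h1 : (f + 1) / 2 = t := by omega
    have h2 : (f + 1) % 2 = 0 := by omega
    rw [h1, h2, popcountAux_eq f t t (by omega) le_rfl]
    omega

theorem pc_odd (t : Nat) : popcount (2 * t + 1) = popcount t + 1 := by
  unfold popcount
  have h0 : ¬ 2 * t + 1 = 0 := by omega
  simp only [popcountAux, if_neg h0]
  have h1 : (2 * t + 1) / 2 = t := by omega
  have h2 : (2 * t + 1) % 2 = 1 := by omega
  rw [h1, h2, popcountAux_eq (2 * t) t t (by omega) le_rfl]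

theorem S_succ (m : Nat) : S (m + 1) = S m + 2 ^ popcount m := by
  simp [S, List.range_succ]

theorem S_even : ∀ t : Nat, S (2 * t) = 3 * S t := by
  intro t
  induction t with
  | zero => simp [S]
  | succ t ih =>
    have h : 2 * (t + 1) = (2 * t + 1) + 1 := by ring
    rw [h, S_succ, S_succ, S_succ, ih, pc_even, pc_odd]
    ring

theorem S_odd (t : Nat) : S (2 * t + 1) = 2 * S t + S (t + 1) := by
  rw [S_succ, S_even, pc_even, S_succ]
  ring

theorem totalAux_eq_S : ∀ (f m : Nat), m ≤ f → totalAux f m = S m := by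
  intro f
  induction f with
  | zero =>
    intro m h
    interval_cases m
    simp [totalAux, S]
  | succ f ih =>
    intro m h
    by_cases h0 : m = 0
    · simp [h0, totalAux, S]
    by_cases h1 : m = 1
    · subst h1
      rw [show (1:Nat) = 0 + 1 from rfl, S_succ, pc_zero]
      simp [totalAux, S]
    by_cases h2 : m % 2 = 0
    · have hm : m = 2 * (m / 2) := by omega
      simp only [totalAux, if_neg h0, if_neg h1, if_pos h2]
      rw [ih (m / 2) (by omega)]
      conv_rhs => rw [hm]
      rw [S_even]
    · have hk : m = 2 * ((m - 1) / 2) + 1 := by omega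
      simp only [totalAux, if_neg h0, if_neg h1, if_neg h2]
      rw [ih ((m - 1) / 2) (by omega), ih ((m - 1) / 2 + 1) (by omega)]
      conv_rhs => rw [hk, S_odd]

theorem foldlB_eq : ∀ (f m : Nat), m ≤ f →
    ((bitsRevAux f m).reverse).foldl stepB (0, 0) = (S m, popcount m) := by
  intro f
  induction f with
  | zero =>
    intro m h
    interval_cases m
    simp [bitsRevAux, S, pc_zero]
  | succ f ih =>
    intro m h
    by_cases h0 : m = 0
    · simp [h0, bitsRevAux, S, pc_zero]
    · simp only [bitsRevAux, if_neg h0, List.reverse_cons, List.foldl_append,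
        List.foldl_cons, List.foldl_nil]
      rw [ih (m / 2) (by omega)]
      by_cases h2 : m % 2 = 0
      · have hm : m = 2 * (m / 2) := by omega
        have hS : S m = 3 * S (m / 2) := by nth_rewrite 1 [hm]; rw [S_even]
        have hP : popcount m = popcount (m / 2) := by nth_rewrite 1 [hm]; rw [pc_even]
        simp [stepB, h2, hS, hP, mul_comm]
      · have h1 : m % 2 = 1 := by omega
        have hm : m = 2 * (m / 2) + 1 := by omega
        have hS : S m = 3 * S (m / 2) + 2 ^ popcount (m / 2) := by
          nth_rewrite 1 [hm]; rw [S_succ, S_even, pc_even]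
        have hP : popcount m = popcount (m / 2) + 1 := by nth_rewrite 1 [hm]; rw [pc_odd]
        simp [stepB, h1, hS, hP, mul_comm]

theorem alt_eq_S (n : Int) : total_alt n = S n.toNat := by
  unfold total_alt pyBin
  rw [foldlB_eq n.toNat n.toNat le_rfl]

-- ===== VERDICT (by name: the statement is the Claim_ definition above) =====
theorem total_spec : Claim_equal_total := by
  intro n _ _
  unfold Spec_total total
  rw [totalAux_eq_S n.toNat n.toNat le_rfl, alt_eq_S n]
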